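-- pv_equiv track=rewrite | github.com/morningsun77/ltr_checker | modules/module2.py | _find_2bp_palindromic_motif
-- ===== SOURCE A (Python) =====
-- def _find_2bp_palindromic_motif(seq, ltr5_start, ltr5_end, ltr3_start, ltr3_end, search_range=100):
--     """Search for 2bp palindromic motifs near internal boundaries
--
--     For 5' LTR: Search for ...CA at its 3' end (right boundary)
--     For 3' LTR: Search for TG... at its 5' end (left boundary)
--     """
--     # Search 3' end of 5' LTR (internal boundary)
--     end_search_begin = max(0, ltr5_end - search_range)
--     end_search_end = min(len(seq), ltr5_end + search_range)
--     end_region = seq[end_search_begin:end_search_end]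
--
--     ca_positions = []
--     for i in range(len(end_region) - 1):
--         if end_region[i:i+2].upper() == "CA":
--             # CA's end position as new end position for 5' LTR
--             ca_positions.append(end_search_begin + i + 2)
--
--     # Search 5' end of 3' LTR (internal boundary)
--     start_search_begin = max(0, ltr3_start - search_range)
--     start_search_end = min(len(seq), ltr3_start + search_range)
--     start_region = seq[start_search_begin:start_search_end]
--
--     tg_positions = []
--     for i in range(len(start_region) - 1):
--         if start_region[i:i+2].upper() == "TG":
--             # TG's start position as new start position for 3' LTR
--             tg_positions.append(start_search_begin + i)
--
--     # Return positions closest to original predictions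
--     new_5ltr_end = None
--     new_3ltr_start = None
--
--     if ca_positions:
--         new_5ltr_end = min(ca_positions, key=lambda x: abs(x - ltr5_end))
--
--     if tg_positions:
--         new_3ltr_start = min(tg_positions, key=lambda x: abs(x - ltr3_start))
--
--     return new_5ltr_end, new_3ltr_start
-- ===== SOURCE B (Python) =====
-- def _nearest(seq, center, search_range, pat, off):
--     """Probe outward from `center`: smallest achievable distance first, left before right."""
--     begin = max(0, center - search_range)
--     end = min(len(seq), center + search_range)
--     region = seq[begin:end]
--     n = len(region)
--     if n < 2:
--         return None
--     lo = begin + off            # smallest possible reported position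
--     hi = begin + n - 2 + off    # largest possible reported position
--     mind = 0 if lo <= center <= hi else min(abs(center - lo), abs(hi - center))
--     maxd = max(abs(center - lo), abs(hi - center))
--     for d in range(mind, maxd + 1):
--         for v in (center - d, center + d):
--             i = v - begin - off
--             if 0 <= i <= n - 2 and region[i:i + 2].upper() == pat:
--                 return v
--     return None
--
--
-- def _find_2bp_palindromic_motif(seq, ltr5_start, ltr5_end, ltr3_start, ltr3_end, search_range=100):
--     return (_nearest(seq, ltr5_end, search_range, "CA", 2),
--             _nearest(seq, ltr3_start, search_range, "TG", 0))
-- ===== Notes on version B (the rewrite author's own statement) =====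
-- stated objective: alternative
-- what changed: B never builds the lists of CA/TG match positions: for each side it probes outward from the boundary (distance 0, 1, 2, ..., left candidate before the right one at equal distance) and returns the first in-window 2bp match, which reproduces min(positions, key=abs-distance) including its first-minimal tie rule.
import Mathlib
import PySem

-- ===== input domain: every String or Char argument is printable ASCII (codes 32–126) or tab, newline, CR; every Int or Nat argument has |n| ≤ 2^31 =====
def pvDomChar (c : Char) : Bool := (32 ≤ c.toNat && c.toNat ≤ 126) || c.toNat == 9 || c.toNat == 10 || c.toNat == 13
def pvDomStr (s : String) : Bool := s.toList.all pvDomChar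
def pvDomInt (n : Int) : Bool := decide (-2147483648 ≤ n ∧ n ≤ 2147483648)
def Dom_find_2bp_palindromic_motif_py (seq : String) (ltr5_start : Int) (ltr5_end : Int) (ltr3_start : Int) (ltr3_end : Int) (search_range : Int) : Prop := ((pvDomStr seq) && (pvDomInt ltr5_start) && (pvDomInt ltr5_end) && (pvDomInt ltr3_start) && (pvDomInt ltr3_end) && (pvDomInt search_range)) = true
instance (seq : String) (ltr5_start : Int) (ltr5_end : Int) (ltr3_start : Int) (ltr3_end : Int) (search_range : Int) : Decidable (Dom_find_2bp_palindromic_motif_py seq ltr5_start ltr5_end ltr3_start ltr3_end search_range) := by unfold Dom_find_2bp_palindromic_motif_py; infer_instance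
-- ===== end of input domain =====

-- B replaces A's collect-all-matches-then-min-by-distance with an outward probe from the
-- boundary (distance 0, 1, 2, …, left candidate before right), returning the first match;
-- objective: alternative decomposition (no position list is ever built).

-- ===== PORT A =====
-- one window scan of A: collect `bg + i + off` for every i in range(len(region)-1)
-- whose 2-char slice upper-cases to `pat` (off = 2 for "CA", 0 for "TG")
def pvCollect (region : List Char) (bg off : Int) (pat : List Char) : List Int :=
  (PySem.List.pyRange 0 ((region.length : Int) - 1) 1).foldl
    (fun acc i =>
      if PySem.Chars.upper (PySem.List.slice region (some i) (some (i + 2))) == pat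
      then acc ++ [bg + i + off] else acc) []

def find_2bp_palindromic_motif_py (seq : String) (ltr5_start : Int) (ltr5_end : Int) (ltr3_start : Int) (ltr3_end : Int) (search_range : Int) : Option Int × Option Int :=
  let s := seq.toList
  let endSearchBegin := max 0 (ltr5_end - search_range)
  let endSearchEnd := min (s.length : Int) (ltr5_end + search_range)
  let endRegion := PySem.List.slice s (some endSearchBegin) (some endSearchEnd)
  let caPositions := pvCollect endRegion endSearchBegin 2 ['C', 'A']
  let startSearchBegin := max 0 (ltr3_start - search_range)
  let startSearchEnd := min (s.length : Int) (ltr3_start + search_range)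
  let startRegion := PySem.List.slice s (some startSearchBegin) (some startSearchEnd)
  let tgPositions := pvCollect startRegion startSearchBegin 0 ['T', 'G']
  (PySem.List.min? caPositions (fun x => |x - ltr5_end|),
   PySem.List.min? tgPositions (fun x => |x - ltr3_start|))

-- ===== PORT B =====
-- does position v correspond to an in-window index whose 2bp slice upper-cases to pat?
def pvHit (region : List Char) (bg off : Int) (pat : List Char) (v : Int) : Bool :=
  let i := v - bg - off
  decide (0 ≤ i ∧ i ≤ (region.length : Int) - 2) &&
    (PySem.Chars.upper (PySem.List.slice region (some i) (some (i + 2))) == pat)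

-- the `for d in range(maxd+1): for v in (center-d, center+d)` loop of Source B
def pvProbeLoop (hit : Int → Bool) (c : Int) : Nat → Nat → Option Int
  | _, 0 => none
  | d, fuel + 1 =>
    if hit (c - (d : Int)) then some (c - (d : Int))
    else if hit (c + (d : Int)) then some (c + (d : Int))
    else pvProbeLoop hit c (d + 1) fuel

def pvNearest (s : List Char) (center srange off : Int) (pat : List Char) : Option Int :=
  let bg := max 0 (center - srange)
  let en := min (s.length : Int) (center + srange)
  let region := PySem.List.slice s (some bg) (some en)
  if region.length < 2 then none
  else
    let lo := bg + off
    let hi := bg + (region.length : Int) - 2 + off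
    let mind := if lo ≤ center ∧ center ≤ hi then 0
                else min ((center - lo).natAbs) ((hi - center).natAbs)
    let maxd := max ((center - lo).natAbs) ((hi - center).natAbs)
    pvProbeLoop (pvHit region bg off pat) center mind (maxd + 1 - mind)

def find_2bp_palindromic_motif_py_alt (seq : String) (ltr5_start : Int) (ltr5_end : Int) (ltr3_start : Int) (ltr3_end : Int) (search_range : Int) : Option Int × Option Int :=
  (pvNearest seq.toList ltr5_end search_range 2 ['C', 'A'],
   pvNearest seq.toList ltr3_start search_range 0 ['T', 'G'])

-- ===== PRECONDITION & SPEC =====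
def Spec_find_2bp_palindromic_motif_py (seq : String) (ltr5_start : Int) (ltr5_end : Int) (ltr3_start : Int) (ltr3_end : Int) (search_range : Int) (out : Option Int × Option Int) : Prop := out = find_2bp_palindromic_motif_py_alt seq ltr5_start ltr5_end ltr3_start ltr3_end search_range
instance (seq : String) (ltr5_start : Int) (ltr5_end : Int) (ltr3_start : Int) (ltr3_end : Int) (search_range : Int) (out : Option Int × Option Int) : Decidable (Spec_find_2bp_palindromic_motif_py seq ltr5_start ltr5_end ltr3_start ltr3_end search_range out) := by unfold Spec_find_2bp_palindromic_motif_py; infer_instance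

-- ===== CLAIM (what is proved, stated in full; the proofs are below) =====
def Claim_equal_find_2bp_palindromic_motif_py : Prop := ∀ (seq : String) (ltr5_start : Int) (ltr5_end : Int) (ltr3_start : Int) (ltr3_end : Int) (search_range : Int), Dom_find_2bp_palindromic_motif_py seq ltr5_start ltr5_end ltr3_start ltr3_end search_range → Spec_find_2bp_palindromic_motif_py seq ltr5_start ltr5_end ltr3_start ltr3_end search_range (find_2bp_palindromic_motif_py seq ltr5_start ltr5_end ltr3_start ltr3_end search_range)

-- ===== LEMMAS AND PROOFS =====

-- membership in A's collected list is exactly B's hit test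
lemma mem_pvCollect {region : List Char} {bg off : Int} {pat : List Char} {v : Int} :
    v ∈ pvCollect region bg off pat ↔ pvHit region bg off pat v = true := by
  unfold pvCollect
  rw [PySem.List.foldl_append_if]
  simp only [List.nil_append, List.mem_map, List.mem_filter, PySem.List.mem_pyRange_one, pvHit,
    Bool.and_eq_true, decide_eq_true_eq]
  constructor
  · rintro ⟨i, ⟨⟨h0, h1⟩, hq⟩, rfl⟩
    have hi : bg + i + off - bg - off = i := by ring
    rw [hi]
    exact ⟨⟨h0, by omega⟩, hq⟩
  · rintro ⟨⟨h0, h1⟩, hq⟩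
    exact ⟨v - bg - off, ⟨⟨h0, by omega⟩, hq⟩, by ring⟩

lemma pyRange_pairwise (b : Int) : (PySem.List.pyRange 0 b 1).Pairwise (· < ·) := by
  by_cases hb : b ≤ 0
  · have : PySem.List.pyRange 0 b 1 = [] := by
      rw [List.eq_nil_iff_forall_not_mem]
      intro x hx
      rw [PySem.List.mem_pyRange_one] at hx
      omega
    rw [this]; exact List.Pairwise.nil
  · have hcast : b = ((b.toNat : Nat) : Int) := by omega
    rw [hcast, PySem.List.pyRange_zero_natCast]
    exact (List.pairwise_lt_range).map _ (by intro a c h; exact_mod_cast h)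

lemma pvCollect_pairwise (region : List Char) (bg off : Int) (pat : List Char) :
    (pvCollect region bg off pat).Pairwise (· < ·) := by
  unfold pvCollect
  rw [PySem.List.foldl_append_if, List.nil_append]
  exact ((pyRange_pairwise _).filter _).map _ (by intro a c h; omega)

-- once the accumulator holds v and nothing later strictly beats it, the fold keeps v
lemma fold_keep_gen (f : Option Int → Int → Option Int) (key : Int → Int)
    (hstep : ∀ m x, f (some m) x = if key x < key m then some x else some m)
    (v : Int) (xs : List Int) (h : ∀ w ∈ xs, ¬ key w < key v) :
    xs.foldl f (some v) = some v := by
  induction xs with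
  | nil => rfl
  | cons x t ih =>
    rw [List.foldl_cons, hstep, if_neg (h x (List.mem_cons_self ..))]
    exact ih (fun w hw => h w (List.mem_cons_of_mem _ hw))

-- min(xs, key) is the first key-minimal element: on a strictly increasing list it is the
-- lexicographically (key, value)-minimal element
lemma min?_first {xs : List Int} {key : Int → Int} {v : Int}
    (hp : xs.Pairwise (· < ·)) (hv : v ∈ xs)
    (hmin : ∀ w ∈ xs, key v < key w ∨ (key v = key w ∧ v ≤ w)) :
    PySem.List.min? xs key = some v := by
  obtain ⟨pre, post, rfl⟩ := List.append_of_mem hv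
  have hpre : ∀ w ∈ pre, key v < key w := by
    intro w hw
    have hlt : w < v := (List.pairwise_append.mp hp).2.2 w hw v (List.mem_cons_self ..)
    rcases hmin w (List.mem_append_left _ hw) with h | ⟨_, hle⟩
    · exact h
    · omega
  have hpost : ∀ w ∈ post, ¬ key w < key v := by
    intro w hw
    rcases hmin w (List.mem_append_right _ (List.mem_cons_of_mem _ hw)) with h | ⟨he, _⟩ <;> omega
  unfold PySem.List.min?
  rw [List.foldl_append]
  rcases List.eq_nil_or_concat' pre with rfl | ⟨l, a, rfl⟩
  · rw [List.foldl_nil, List.foldl_cons]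
    exact fold_keep_gen _ key (fun m x => rfl) v post hpost
  · have hne : l ++ [a] ≠ [] := by simp
    obtain ⟨m, hm⟩ : ∃ m, PySem.List.min? (l ++ [a]) key = some m := by
      cases hmm : PySem.List.min? (l ++ [a]) key with
      | none => exact absurd ((PySem.List.min?_eq_none_iff _ _).mp hmm) hne
      | some m => exact ⟨m, rfl⟩
    have hmmem : m ∈ l ++ [a] := PySem.List.min?_mem hm
    unfold PySem.List.min? at hm
    rw [hm, List.foldl_cons]
    show List.foldl _ (if key v < key m then some v else some m) post = some v
    rw [if_pos (hpre m hmmem)]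
    exact fold_keep_gen _ key (fun m x => rfl) v post hpost

lemma probeLoop_none {hit : Int → Bool} {c : Int} {d fuel : Nat}
    (h : pvProbeLoop hit c d fuel = none) :
    ∀ k < fuel, hit (c - ((d + k : Nat) : Int)) = false ∧ hit (c + ((d + k : Nat) : Int)) = false := by
  induction fuel generalizing d with
  | zero => omega
  | succ n ih =>
    unfold pvProbeLoop at h
    split_ifs at h with h1 h2
    intro k hk
    rcases Nat.eq_zero_or_pos k with rfl | hkpos
    · constructor
      · simpa using (Bool.not_eq_true _).mp h1
      · simpa using (Bool.not_eq_true _).mp h2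
    · have := ih h (k - 1) (by omega)
      have he : d + 1 + (k - 1) = d + k := by omega
      rwa [he] at this

lemma probeLoop_some {hit : Int → Bool} {c : Int} {d fuel : Nat} {v : Int}
    (h : pvProbeLoop hit c d fuel = some v) :
    ∃ k < fuel, (v = c - ((d + k : Nat) : Int) ∨
        (v = c + ((d + k : Nat) : Int) ∧ hit (c - ((d + k : Nat) : Int)) = false)) ∧
      hit v = true ∧
      ∀ j < k, hit (c - ((d + j : Nat) : Int)) = false ∧ hit (c + ((d + j : Nat) : Int)) = false := by
  induction fuel generalizing d with
  | zero => simp [pvProbeLoop] at h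
  | succ n ih =>
    unfold pvProbeLoop at h
    split_ifs at h with h1 h2
    · refine ⟨0, by omega, ?_, ?_, by omega⟩
      · left; rw [Option.some_inj] at h; omega
      · rw [Option.some_inj] at h; rw [h] at h1; simpa using h1
    · refine ⟨0, by omega, ?_, ?_, by omega⟩
      · right
        rw [Option.some_inj] at h
        exact ⟨by omega, by simpa using (Bool.not_eq_true _).mp h1⟩
      · rw [Option.some_inj] at h; rw [h] at h2; simpa using h2
    · obtain ⟨k, hk, hv, hhit, hjs⟩ := ih h
      refine ⟨k + 1, by omega, ?_, hhit, ?_⟩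
      · have he : d + 1 + k = d + (k + 1) := by omega
        rwa [he] at hv
      · intro j hj
        rcases Nat.eq_zero_or_pos j with rfl | hjpos
        · exact ⟨by simpa using (Bool.not_eq_true _).mp h1,
                 by simpa using (Bool.not_eq_true _).mp h2⟩
        · have := hjs (j - 1) (by omega)
          have he : d + 1 + (j - 1) = d + j := by omega
          rwa [he] at this

-- positions that hit stay within the window, so the probe's distance budget covers them
lemma pvHit_bound {region : List Char} {bg off v : Int} {pat : List Char}
    (h : pvHit region bg off pat v = true) :
    0 ≤ v - bg - off ∧ v - bg - off ≤ (region.length : Int) - 2 := by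
  unfold pvHit at h
  simp only [Bool.and_eq_true, decide_eq_true_eq] at h
  exact h.1

-- the heart: A's min-by-distance over the collected list = B's outward probe
lemma core_eq (R : List Char) (bg c off : Int) (pat : List Char) :
    (if R.length < 2 then none
     else
       pvProbeLoop (pvHit R bg off pat) c
         (if bg + off ≤ c ∧ c ≤ bg + (R.length : Int) - 2 + off then 0
          else min ((c - (bg + off)).natAbs) ((bg + (R.length : Int) - 2 + off - c).natAbs))
         (max ((c - (bg + off)).natAbs) ((bg + (R.length : Int) - 2 + off - c).natAbs) + 1 -
           (if bg + off ≤ c ∧ c ≤ bg + (R.length : Int) - 2 + off then 0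
            else min ((c - (bg + off)).natAbs) ((bg + (R.length : Int) - 2 + off - c).natAbs))))
      = PySem.List.min? (pvCollect R bg off pat) (fun x => |x - c|) := by
  rcases Nat.lt_or_ge R.length 2 with hlen | hlen
  · rw [if_pos hlen]
    symm
    rw [PySem.List.min?_eq_none_iff, List.eq_nil_iff_forall_not_mem]
    intro v hv
    have := pvHit_bound (mem_pvCollect.mp hv)
    omega
  · rw [if_neg (by omega)]
    set hit := pvHit R bg off pat with hhit
    set mind := (if bg + off ≤ c ∧ c ≤ bg + (R.length : Int) - 2 + off then 0
          else min ((c - (bg + off)).natAbs) ((bg + (R.length : Int) - 2 + off - c).natAbs))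
      with hmind
    set maxd := max ((c - (bg + off)).natAbs) ((bg + (R.length : Int) - 2 + off - c).natAbs)
      with hmaxd
    have hbound : ∀ v : Int, hit v = true → mind ≤ (v - c).natAbs ∧ (v - c).natAbs ≤ maxd := by
      intro v hv
      have := pvHit_bound hv
      rw [hmind, hmaxd]
      split_ifs <;> omega
    cases hres : pvProbeLoop hit c mind (maxd + 1 - mind) with
    | none =>
      symm
      rw [PySem.List.min?_eq_none_iff, List.eq_nil_iff_forall_not_mem]
      intro v hv
      have hv' : hit v = true := mem_pvCollect.mp hv
      have hb := hbound v hv'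
      have hk := probeLoop_none hres ((v - c).natAbs - mind) (by omega)
      have he : mind + ((v - c).natAbs - mind) = (v - c).natAbs := by omega
      rw [he] at hk
      have : v = c - ((v - c).natAbs : Int) ∨ v = c + ((v - c).natAbs : Int) := by omega
      rcases this with h | h
      · rw [h] at hv'; rw [hk.1] at hv'; exact Bool.false_ne_true hv'
      · rw [h] at hv'; rw [hk.2] at hv'; exact Bool.false_ne_true hv'
    | some v =>
      obtain ⟨k, hkfuel, hvk, hhitv, hjs⟩ := probeLoop_some hres
      symm
      apply min?_first (pvCollect_pairwise R bg off pat) (mem_pvCollect.mpr hhitv)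
      intro w hw
      have hhw : hit w = true := mem_pvCollect.mp hw
      have hbw := hbound w hhw
      have hwk : mind + k ≤ (w - c).natAbs := by
        by_contra hlt
        rw [Nat.not_le] at hlt
        have hj := hjs ((w - c).natAbs - mind) (by omega)
        have he : mind + ((w - c).natAbs - mind) = (w - c).natAbs := by omega
        rw [he] at hj
        have : w = c - ((w - c).natAbs : Int) ∨ w = c + ((w - c).natAbs : Int) := by omega
        rcases this with h | h
        · rw [h] at hhw; rw [hj.1] at hhw; exact Bool.false_ne_true hhw
        · rw [h] at hhw; rw [hj.2] at hhw; exact Bool.false_ne_true hhw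
      have habs : ∀ x : Int, |x - c| = ((x - c).natAbs : Int) := fun x => Int.abs_eq_natAbs _
      rw [habs v, habs w]
      have hvabs : (v - c).natAbs = mind + k := by
        rcases hvk with ⟨h, _⟩ | ⟨⟨h, _⟩, _⟩ <;> omega
      rcases Nat.lt_or_ge (mind + k) (w - c).natAbs with hlt | hge
      · left; exact_mod_cast by omega
      · have hwke : (w - c).natAbs = mind + k := by omega
        rcases hvk with h | ⟨hv2, hnohit⟩
        · right
          constructor
          · exact_mod_cast by omega
          · omega
        · have hwne : w ≠ c - ((mind + k : Nat) : Int) := by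
            intro he; rw [he] at hhw; rw [hhw] at hnohit; simp at hnohit
          have : w = c + ((mind + k : Nat) : Int) := by omega
          right
          constructor
          · exact_mod_cast by omega
          · omega

-- ===== VERDICT (by name: the statement is the Claim_ definition above) =====
theorem find_2bp_palindromic_motif_py_spec : Claim_equal_find_2bp_palindromic_motif_py := by
  intro seq l5s l5e l3s l3e sr _
  unfold Spec_find_2bp_palindromic_motif_py
  unfold find_2bp_palindromic_motif_py find_2bp_palindromic_motif_py_alt pvNearest
  refine Prod.ext ?_ ?_ <;> simp only <;> rw [← core_eq]
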